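-- pv_equiv track=rewrite | github.com/evanarlian/kaggle-aimo2 | aimo2/huikang.py | create_starter_messages
-- ===== SOURCE A (Python) =====
-- def create_starter_messages(question: str, index: int):
--     options = []
--     for _ in range(13):
--         options.append(
--             [
--                 {
--                     "role": "system",
--                     "content": "You are a helpful and harmless assistant. You are Qwen developed by Alibaba. You should think step-by-step. Return final answer within \\boxed{}, after taking modulo 1000.",
--                 },
--                 {"role": "user", "content": question},
--             ]
--         )
--     for _ in range(3):
--         options.append(
--             [
--                 {
--                     "role": "system",
--                     "content": "You are a helpful and harmless assistant. You are Qwen developed by Alibaba. You should think step-by-step. After you get your final answer, take modulo 1000, and return the final answer within \\boxed{}.",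
--                 },
--                 {"role": "user", "content": question},
--             ],
--         )
--     return options[index % len(options)]
-- ===== SOURCE B (Python) =====
-- SYS_BOXED_FIRST = "You are a helpful and harmless assistant. You are Qwen developed by Alibaba. You should think step-by-step. Return final answer within \\boxed{}, after taking modulo 1000."
-- SYS_MODULO_FIRST = "You are a helpful and harmless assistant. You are Qwen developed by Alibaba. You should think step-by-step. After you get your final answer, take modulo 1000, and return the final answer within \\boxed{}."
--
-- def create_starter_messages(question: str, index: int):
--     i = index % 16
--     system = SYS_BOXED_FIRST if i < 13 else SYS_MODULO_FIRST
--     return [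
--         {"role": "system", "content": system},
--         {"role": "user", "content": question},
--     ]
-- ===== Notes on version B (the rewrite author's own statement) =====
-- stated objective: simpler
-- what changed: B never builds the 16-entry options list with two append loops; it computes i = index % 16 once, picks the system prompt by the i < 13 test, and constructs the two-message list directly.
import Mathlib
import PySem

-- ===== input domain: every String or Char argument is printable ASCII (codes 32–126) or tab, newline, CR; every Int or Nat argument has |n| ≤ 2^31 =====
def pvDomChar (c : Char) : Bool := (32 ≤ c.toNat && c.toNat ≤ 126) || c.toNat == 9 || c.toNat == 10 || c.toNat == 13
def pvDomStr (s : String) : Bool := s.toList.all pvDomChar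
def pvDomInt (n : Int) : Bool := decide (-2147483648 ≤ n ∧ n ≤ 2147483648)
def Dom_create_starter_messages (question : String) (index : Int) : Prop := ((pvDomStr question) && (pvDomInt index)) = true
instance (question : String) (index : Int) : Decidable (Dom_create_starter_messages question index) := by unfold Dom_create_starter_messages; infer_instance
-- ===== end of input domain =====

-- B replaces A's two append loops building a 16-entry options list by picking the
-- system prompt from index % 16 < 13 and constructing the returned list directly (objective: simpler).

-- the two system-prompt strings (byte-identical to the Python literals)
def pvSysBoxedFirst : String := "You are a helpful and harmless assistant. You are Qwen developed by Alibaba. You should think step-by-step. Return final answer within \\boxed{}, after taking modulo 1000."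
def pvSysModuloFirst : String := "You are a helpful and harmless assistant. You are Qwen developed by Alibaba. You should think step-by-step. After you get your final answer, take modulo 1000, and return the final answer within \\boxed{}."

-- ===== PORT A =====
-- options[index % len(options)]: len(options) = 16 and 0 ≤ index % 16 < 16, so the
-- Python indexing never raises; pyGetD with default [] is exact here.
def create_starter_messages (question : String) (index : Int) : List (List (String × String)) :=
  let options : List (List (List (String × String))) :=
    (PySem.List.pyRange 0 13 1).foldl (fun acc _ =>
      acc ++ [[[("role", "system"), ("content", pvSysBoxedFirst)],
               [("role", "user"), ("content", question)]]]) []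
  let options :=
    (PySem.List.pyRange 0 3 1).foldl (fun acc _ =>
      acc ++ [[[("role", "system"), ("content", pvSysModuloFirst)],
               [("role", "user"), ("content", question)]]]) options
  PySem.List.pyGetD options (PySem.Int.mod index (options.length : Int)) []

-- ===== PORT B =====
def create_starter_messages_alt (question : String) (index : Int) : List (List (String × String)) :=
  let i := PySem.Int.mod index 16
  let system := if i < 13 then pvSysBoxedFirst else pvSysModuloFirst
  [[("role", "system"), ("content", system)],
   [("role", "user"), ("content", question)]]

-- ===== PRECONDITION & SPEC =====
def Spec_create_starter_messages (question : String) (index : Int) (out : List (List (String × String))) : Prop := out = create_starter_messages_alt question index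
instance (question : String) (index : Int) (out : List (List (String × String))) : Decidable (Spec_create_starter_messages question index out) := by unfold Spec_create_starter_messages; infer_instance

-- ===== CLAIM (what is proved, stated in full; the proofs are below) =====
def Claim_equal_create_starter_messages : Prop := ∀ (question : String) (index : Int), Dom_create_starter_messages question index → Spec_create_starter_messages question index (create_starter_messages question index)

-- ===== LEMMAS AND PROOFS =====

set_option maxHeartbeats 2000000 in
theorem create_starter_messages_eq (question : String) (index : Int) :
    create_starter_messages question index = create_starter_messages_alt question index := by
  have h0 : (0:Int) < 16 := by norm_num
  have hlo := PySem.Int.mod_nonneg index h0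
  have hhi := PySem.Int.mod_lt index h0
  set j := PySem.Int.mod index 16 with hj
  have hA : create_starter_messages question index =
      PySem.List.pyGetD
        [[[("role", "system"), ("content", pvSysBoxedFirst)], [("role", "user"), ("content", question)]],
         [[("role", "system"), ("content", pvSysBoxedFirst)], [("role", "user"), ("content", question)]],
         [[("role", "system"), ("content", pvSysBoxedFirst)], [("role", "user"), ("content", question)]],
         [[("role", "system"), ("content", pvSysBoxedFirst)], [("role", "user"), ("content", question)]],
         [[("role", "system"), ("content", pvSysBoxedFirst)], [("role", "user"), ("content", question)]],
         [[("role", "system"), ("content", pvSysBoxedFirst)], [("role", "user"), ("content", question)]],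
         [[("role", "system"), ("content", pvSysBoxedFirst)], [("role", "user"), ("content", question)]],
         [[("role", "system"), ("content", pvSysBoxedFirst)], [("role", "user"), ("content", question)]],
         [[("role", "system"), ("content", pvSysBoxedFirst)], [("role", "user"), ("content", question)]],
         [[("role", "system"), ("content", pvSysBoxedFirst)], [("role", "user"), ("content", question)]],
         [[("role", "system"), ("content", pvSysBoxedFirst)], [("role", "user"), ("content", question)]],
         [[("role", "system"), ("content", pvSysBoxedFirst)], [("role", "user"), ("content", question)]],
         [[("role", "system"), ("content", pvSysBoxedFirst)], [("role", "user"), ("content", question)]],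
         [[("role", "system"), ("content", pvSysModuloFirst)], [("role", "user"), ("content", question)]],
         [[("role", "system"), ("content", pvSysModuloFirst)], [("role", "user"), ("content", question)]],
         [[("role", "system"), ("content", pvSysModuloFirst)], [("role", "user"), ("content", question)]]]
        j [] := rfl
  have hB : create_starter_messages_alt question index =
      [[("role", "system"), ("content", if j < 13 then pvSysBoxedFirst else pvSysModuloFirst)],
       [("role", "user"), ("content", question)]] := rfl
  rw [hA, hB]
  interval_cases j <;> rfl

-- ===== VERDICT (by name: the statement is the Claim_ definition above) =====
theorem create_starter_messages_spec : Claim_equal_create_starter_messages := by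
  intro question index _
  exact create_starter_messages_eq question index
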